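-- pv_equiv track=rewrite | github.com/bradykim7/Algorithm | HackerRank/Problem_Solving/String/Two_Characters.py | alternate
-- ===== SOURCE A (Python) =====
-- def alternate(s):
--
--     temp = list(set(s));
--     c=[];
--     for i in range(0,len(temp)-1):
--         for j in range(i+1,len(temp)):
--             c.append([temp[i],temp[j]]);
--     pre=0;
--
--     for i in range(len(c)):
--         ml = s;
--         flag =0;
--         for j in range(len(s)):
--             if s[j] not in c[i]:
--                 ml=ml.replace(s[j],'')
--
--         for k in range(0,len(ml)-1):
--             if ml[k] == ml[k+1]:
--                 flag=1;
--                 break;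
--
--         if flag == 0:
--             if i == 0:
--                 pre=len(ml);
--             else:
--                 if len(ml) > pre:
--                     pre = len(ml);
--     return pre
-- ===== SOURCE B (Python) =====
-- def _step(p, v, ch):
--     last, cnt, ok = v
--     if ok and (ch == p[0] or ch == p[1]):
--         if last == ch:
--             return (last, cnt, False)
--         return (ch, cnt + 1, True)
--     return v
--
--
-- def alternate(s):
--     chars = list(dict.fromkeys(s))
--     pairs = []
--     for i, a in enumerate(chars):
--         for b in chars[i + 1:]:
--             pairs.append((a, b))
--     state = [(None, 0, True) for _ in pairs]
--     for ch in s: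
--         state = [_step(p, v, ch) for p, v in zip(pairs, state)]
--     best = 0
--     for (_last, cnt, ok) in state:
--         if ok and cnt > best:
--             best = cnt
--     return best
-- ===== Notes on version B (the rewrite author's own statement) =====
-- stated objective: faster
-- what changed: B replaces A's per-pair rebuild of the string via repeated str.replace plus a separate adjacency scan with a single pass over s that maintains (last_char, count, valid) state for every unordered pair of distinct characters.
import Mathlib
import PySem

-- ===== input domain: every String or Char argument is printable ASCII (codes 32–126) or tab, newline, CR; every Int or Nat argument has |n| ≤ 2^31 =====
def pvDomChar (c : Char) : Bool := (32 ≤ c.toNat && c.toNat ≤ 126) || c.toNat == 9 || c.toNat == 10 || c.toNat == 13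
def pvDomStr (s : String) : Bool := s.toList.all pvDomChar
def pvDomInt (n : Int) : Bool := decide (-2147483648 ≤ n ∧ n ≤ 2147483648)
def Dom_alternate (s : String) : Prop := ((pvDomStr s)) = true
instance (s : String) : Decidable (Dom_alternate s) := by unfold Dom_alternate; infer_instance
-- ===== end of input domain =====

-- B computes each pair's length/validity in one streaming pass over s instead of A's per-pair
-- rebuild via repeated str.replace plus a separate adjacency re-scan (objective: faster).

-- ===== PORT A =====
-- the k-loop with break: returns flag 1 on the first adjacent equal pair, else 0
def pvChkA : List Char → Int
  | a :: b :: t => if a = b then (1 : Int) else pvChkA (b :: t)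
  | _ => (0 : Int)

-- the outer 'for i in range(len(c))' loop carrying the counter i and the accumulator pre
def pvLoopA (s0 : List Char) : List (List Char) → Int → Int → Int
  | [], _, pre => pre
  | ci :: rest, i, pre =>
      -- ml.replace(s[j], '') for a single character deletes every occurrence: exact as List.filter
      let ml : List Char := s0.foldl (fun ml ch => if ch ∈ ci then ml else ml.filter (fun x => x ≠ ch)) s0
      let flag : Int := pvChkA ml
      let pre' : Int :=
        if flag = 0 then
          (if i = (0 : Int) then (ml.length : Int)
           else if (ml.length : Int) > pre then (ml.length : Int) else pre)
        else pre
      pvLoopA s0 rest (i + 1) pre'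

def alternate (s : String) : Int :=
  let temp : List Char := PySem.Set.ofList s.toList
  let n : Int := (temp.length : Int)
  let c : List (List Char) :=
    (PySem.List.pyRange 0 (n - 1) 1).foldl (fun acc i =>
      (PySem.List.pyRange (i + 1) n 1).foldl (fun acc2 j =>
        acc2 ++ [[PySem.List.pyGetD temp i ' ', PySem.List.pyGetD temp j ' ']]) acc) []
  pvLoopA s.toList c 0 0

-- ===== PORT B =====
def pvStepB (p : Char × Char) (v : Option Char × Int × Bool) (ch : Char) : Option Char × Int × Bool :=
  if v.2.2 && (ch == p.1 || ch == p.2) then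
    (if v.1 == some ch then (v.1, v.2.1, false) else (some ch, v.2.1 + 1, true))
  else v

def alternate_alt (s : String) : Int :=
  let chars : List Char := PySem.List.dedup s.toList
  let pairs : List (Char × Char) :=
    (PySem.List.enumerate chars).foldl (fun acc ia =>
      (PySem.List.slice chars (some (ia.1 + 1)) none).foldl (fun acc2 b => acc2 ++ [(ia.2, b)]) acc) []
  let state0 : List (Option Char × Int × Bool) := pairs.map (fun _ => (none, 0, true))
  let stateF : List (Option Char × Int × Bool) :=
    s.toList.foldl (fun st ch => (pairs.zip st).map (fun pv => pvStepB pv.1 pv.2 ch)) state0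
  stateF.foldl (fun best v => if v.2.2 && v.2.1 > best then v.2.1 else best) 0

-- ===== PRECONDITION & SPEC =====
def Spec_alternate (s : String) (out : Int) : Prop := out = alternate_alt s
instance (s : String) (out : Int) : Decidable (Spec_alternate s out) := by unfold Spec_alternate; infer_instance

-- ===== CLAIM (what is proved, stated in full; the proofs are below) =====
def Claim_equal_alternate : Prop := ∀ (s : String), Dom_alternate s → Spec_alternate s (alternate s)

-- ===== LEMMAS AND PROOFS =====

-- all ordered pairs (earlier element, later element) of a list, structurally
def pvPairsOf : List Char → List (Char × Char)
  | [] => []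
  | x :: t => t.map (fun y => (x, y)) ++ pvPairsOf t

-- "still alternating given the previously seen character"
def pvAltB : Option Char → List Char → Bool
  | _, [] => true
  | last, c :: t => (some c != last) && pvAltB (some c) t

-- A's replace loop: removing (all occurrences of) every char outside 'pair' is a filter
theorem pv_replace_fold (pair : List Char) (u : List Char) :
    ∀ ml : List Char,
      u.foldl (fun ml ch => if ch ∈ pair then ml else ml.filter (fun x => x ≠ ch)) ml
        = ml.filter (fun c => c ∈ pair ∨ c ∉ u) := by
  induction u with
  | nil => intro ml; simp
  | cons ch u' ih =>
    intro ml
    simp only [List.foldl_cons]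
    by_cases h : ch ∈ pair
    · rw [if_pos h, ih]
      apply List.filter_congr
      intro c _
      have hE : c = ch → c ∈ pair := fun e => e ▸ h
      simp only [decide_eq_decide, List.mem_cons]
      tauto
    · rw [if_neg h, ih, List.filter_filter]
      apply List.filter_congr
      intro c _
      have hE : c ∈ pair → ¬ c = ch := fun hc e => h (e ▸ hc)
      rw [← Bool.decide_and]
      simp only [decide_eq_decide, List.mem_cons]
      tauto

theorem pv_ml_eq_filter (pair : List Char) (s0 : List Char) :
    s0.foldl (fun ml ch => if ch ∈ pair then ml else ml.filter (fun x => x ≠ ch)) s0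
      = s0.filter (fun c => c ∈ pair) := by
  rw [pv_replace_fold]
  apply List.filter_congr
  intro c hc
  simp only [decide_eq_decide]
  tauto

-- B's outer fold distributes over the per-pair states
theorem pv_zip_fold (pairs : List (Char × Char)) (u : List Char) :
    ∀ (g : Char × Char → Option Char × Int × Bool),
    u.foldl (fun st ch => (pairs.zip st).map (fun pv => pvStepB pv.1 pv.2 ch)) (pairs.map g)
      = pairs.map (fun p => u.foldl (fun v ch => pvStepB p v ch) (g p)) := by
  induction u with
  | nil => intro g; simp
  | cons ch u' ih =>
    intro g
    simp only [List.foldl_cons]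
    have hz : pairs.zip (pairs.map g) = pairs.map (fun p => (p, g p)) := by
      have := @List.zip_map' _ _ _ (fun p : Char × Char => p) g pairs
      simpa using this
    rw [hz, List.map_map]
    exact ih (fun p => pvStepB p (g p) ch)

-- pvStepB ignores characters outside its pair
theorem pv_run_skip (p : Char × Char) (u : List Char) :
    ∀ v, u.foldl (fun v ch => pvStepB p v ch) v
      = (u.filter (fun c => c = p.1 ∨ c = p.2)).foldl (fun v ch => pvStepB p v ch) v := by
  induction u with
  | nil => intro v; simp
  | cons ch u' ih =>
    intro v
    by_cases h : ch = p.1 ∨ ch = p.2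
    · rw [List.filter_cons_of_pos (by simpa using h)]
      simp only [List.foldl_cons]; exact ih _
    · rw [List.filter_cons_of_neg (by simpa using h)]
      simp only [List.foldl_cons]
      have hst : pvStepB p v ch = v := by
        unfold pvStepB
        have h1 : (ch == p.1 || ch == p.2) = false := by
          simp only [Bool.or_eq_false_iff, beq_eq_false_iff_ne]
          exact ⟨fun e => h (Or.inl e), fun e => h (Or.inr e)⟩
        rw [h1]; simp
      rw [hst]; exact ih v

-- once invalid, the state is frozen
theorem pv_run_frozen (p : Char × Char) (u : List Char) (l : Option Char) (cnt : Int) :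
    u.foldl (fun v ch => pvStepB p v ch) (l, cnt, false) = (l, cnt, false) := by
  induction u with
  | nil => rfl
  | cons ch u' ih => simpa [pvStepB] using ih

-- on a list of pair characters, the run computes validity (pvAltB) and, if valid, the count
theorem pv_run_char (p : Char × Char) (t : List Char) :
    ∀ (last : Option Char) (cnt : Int), (∀ c ∈ t, c = p.1 ∨ c = p.2) →
      (t.foldl (fun v ch => pvStepB p v ch) (last, cnt, true)).2.2 = pvAltB last t ∧
      (pvAltB last t = true →
        (t.foldl (fun v ch => pvStepB p v ch) (last, cnt, true)).2.1 = cnt + t.length) := by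
  induction t with
  | nil => intro last cnt _; simp [pvAltB]
  | cons ch t' ih =>
    intro last cnt hmem
    have hch : (ch == p.1 || ch == p.2) = true := by
      rcases hmem ch (by simp) with h | h <;> simp [h]
    simp only [List.foldl_cons]
    by_cases hl : last = some ch
    · have : pvStepB p (last, cnt, true) ch = (last, cnt, false) := by
        simp [pvStepB, hch, hl]
      rw [this, pv_run_frozen]
      constructor
      · simp [pvAltB, hl]
      · intro hA; exfalso; simp [pvAltB, hl] at hA
    · have : pvStepB p (last, cnt, true) ch = (some ch, cnt + 1, true) := by
        simp [pvStepB, hch]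
        intro e; exact absurd e hl
      rw [this]
      have hmem' : ∀ c ∈ t', c = p.1 ∨ c = p.2 := fun c hc => hmem c (by simp [hc])
      obtain ⟨h1, h2⟩ := ih (some ch) (cnt + 1) hmem'
      have hAeq : pvAltB last (ch :: t') = pvAltB (some ch) t' := by
        have : (some ch != last) = true := by simpa using fun e => hl e.symm
        simp [pvAltB, this]
      refine ⟨by rw [h1, hAeq], ?_⟩
      intro hA
      rw [hAeq] at hA
      rw [h2 hA]
      simp; ring

-- A's adjacency flag and B's validity bit agree
theorem pv_chk_alt (t : List Char) : pvAltB none t = true ↔ pvChkA t = 0 := by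
  have key : ∀ (t : List Char) (x : Char), pvAltB (some x) t = true ↔ pvChkA (x :: t) = 0 := by
    intro t
    induction t with
    | nil => intro x; simp [pvAltB, pvChkA]
    | cons y t' ih =>
      intro x
      by_cases h : x = y
      · subst h; simp [pvAltB, pvChkA]
      · rw [show pvChkA (x :: y :: t') = pvChkA (y :: t') by simp [pvChkA, h]]
        rw [show pvAltB (some x) (y :: t') = pvAltB (some y) t' by
          have : (some y != some x) = true := by simpa using fun e => h e.symm
          simp [pvAltB, this]]
        exact ih y
  cases t with
  | nil => simp [pvAltB, pvChkA]
  | cons x t' => simpa [pvAltB] using key t' x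

-- per pair: A's (flag, len ml) corresponds to B's (valid, count)
theorem pv_elem (s0 : List Char) (p : Char × Char) :
    ((s0.foldl (fun v ch => pvStepB p v ch) (none, 0, true)).2.2 = true
        ↔ pvChkA (s0.foldl (fun ml ch => if ch ∈ [p.1, p.2] then ml else ml.filter (fun x => x ≠ ch)) s0) = 0) ∧
    ((s0.foldl (fun v ch => pvStepB p v ch) (none, 0, true)).2.2 = true →
      (s0.foldl (fun v ch => pvStepB p v ch) (none, 0, true)).2.1
        = ((s0.foldl (fun ml ch => if ch ∈ [p.1, p.2] then ml else ml.filter (fun x => x ≠ ch)) s0).length : Int)) := by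
  have hml : s0.foldl (fun ml ch => if ch ∈ [p.1, p.2] then ml else ml.filter (fun x => x ≠ ch)) s0
      = s0.filter (fun c => c = p.1 ∨ c = p.2) := by
    rw [pv_ml_eq_filter]
    apply List.filter_congr
    intro c _
    simp
  set t := s0.filter (fun c => c = p.1 ∨ c = p.2) with ht
  have hmem : ∀ c ∈ t, c = p.1 ∨ c = p.2 := by
    intro c hc
    rw [ht] at hc
    have := List.of_mem_filter hc
    simpa using this
  have hrun := pv_run_skip p s0 (none, 0, true)
  obtain ⟨h1, h2⟩ := pv_run_char p t none 0 hmem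
  rw [hml, ← ht] at *
  rw [hrun, h1]
  refine ⟨pv_chk_alt t, ?_⟩
  intro hA
  rw [h2 hA]
  omega

-- the two result loops agree (A's i == 0 initialisation equals the running max from 0)
theorem pv_loops_eq (s0 : List Char) (l : List (Char × Char)) :
    ∀ (i pre : Int), 0 ≤ i → (i = 0 → pre = 0) →
      pvLoopA s0 (l.map (fun p => [p.1, p.2])) i pre
        = (l.map (fun p => s0.foldl (fun v ch => pvStepB p v ch) (none, 0, true))).foldl
            (fun best v => if v.2.2 && v.2.1 > best then v.2.1 else best) pre := by
  induction l with
  | nil => intro i pre _ _; simp [pvLoopA]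
  | cons p l' ih =>
    intro i pre hi0 hpre
    simp only [List.map_cons, List.foldl_cons]
    rw [pvLoopA]
    obtain ⟨e1, e2⟩ := pv_elem s0 p
    set r := s0.foldl (fun v ch => pvStepB p v ch) (none, 0, true) with hr
    set ml := s0.foldl (fun ml ch => if ch ∈ [p.1, p.2] then ml else ml.filter (fun x => x ≠ ch)) s0 with hml
    have step_eq :
        (if pvChkA ml = 0 then
          (if i = (0 : Int) then (ml.length : Int)
           else if (ml.length : Int) > pre then (ml.length : Int) else pre)
         else pre)
        = (if r.2.2 && r.2.1 > pre then r.2.1 else pre) := by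
      by_cases hok : r.2.2 = true
      · rw [if_pos (e1.mp hok), hok]
        rw [e2 hok]
        by_cases hi : i = (0 : Int)
        · rw [if_pos hi, hpre hi]
          by_cases hgt : (ml.length : Int) > 0
          · rw [if_pos (by simpa using hgt)]
          · have h0 : (ml.length : Int) = 0 := by omega
            simp [h0]
        · rw [if_neg hi]
          by_cases hgt : (ml.length : Int) > pre
          · rw [if_pos hgt, if_pos (by simpa using hgt)]
          · rw [if_neg hgt, if_neg (by simpa using hgt)]
      · have hflag : ¬ pvChkA ml = 0 := fun h => hok (e1.mpr h)
        rw [if_neg hflag]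
        simp [Bool.eq_false_iff.mpr hok]
    rw [step_eq]
    apply ih _ _ (by omega)
    intro h
    exfalso
    omega

-- indexed pair generation, A side: range/getD loops build pvPairsOf
theorem pv_pairsA (full : List Char) :
    ∀ (t : List Char) (k : Nat), full.drop k = t →
      (PySem.List.pyRange (k : Int) ((full.length : Int) - 1) 1).flatMap
          (fun i => (full.drop (i.toNat + 1)).map
            (fun y => [PySem.List.pyGetD full i ' ', y]))
        = (pvPairsOf t).map (fun p => [p.1, p.2]) := by
  intro t
  induction t with
  | nil =>
    intro k h
    have hk : full.length - k = 0 := by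
      have := congrArg List.length h; simpa using this
    rw [PySem.List.pyRange_one_eq_nil (by omega)]
    simp [pvPairsOf]
  | cons a t' ih =>
    intro k h
    have hlen : full.length - k = t'.length + 1 := by
      have := congrArg List.length h; simpa using this
    have hk : k < full.length := by omega
    have hd : full.drop (k + 1) = t' := by
      have := congrArg List.tail h
      simpa [List.tail_drop] using this
    have hget : PySem.List.pyGetD full (k : Int) ' ' = a := by
      rw [PySem.List.pyGetD_natCast]
      have : full[k]? = some a := by
        have h0 : (full.drop k)[0]? = some a := by rw [h]; rfl
        simpa using h0
      simp [List.getD, this]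
    rcases List.eq_nil_or_concat' t' with ht' | ⟨b, t'', rfl⟩
    · subst ht'
      rw [PySem.List.pyRange_one_eq_nil (by simp at hlen; omega)]
      simp [pvPairsOf]
    · have hklt : (k : Int) < (full.length : Int) - 1 := by simp at hlen ⊢; omega
      rw [PySem.List.pyRange_one_cons hklt]
      simp only [List.flatMap_cons]
      rw [show ((k : Int) + 1) = ((k + 1 : Nat) : Int) by push_cast; ring]
      rw [ih (k + 1) hd]
      have h1 : ((k : Int)).toNat + 1 = k + 1 := by omega
      simp only [h1, hd, hget, pvPairsOf]
      simp [List.map_map, Function.comp]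

-- indexed pair generation, B side: enumerate/slice loops build pvPairsOf
theorem pv_pairsB (full : List Char) :
    ∀ (t : List Char) (k : Nat), full.drop k = t →
      (PySem.List.enumerate t (k : Int)).flatMap
          (fun ia => (full.drop (ia.1.toNat + 1)).map (fun y => (ia.2, y)))
        = pvPairsOf t := by
  intro t
  induction t with
  | nil => intro k h; simp [PySem.List.enumerate, pvPairsOf]
  | cons a t' ih =>
    intro k h
    rw [PySem.List.enumerate_cons]
    simp only [List.flatMap_cons]
    have hd : full.drop (k + 1) = t' := by
      have := congrArg List.tail h
      simpa [List.tail_drop] using this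
    have h1 : ((k : Int)).toNat + 1 = k + 1 := by omega
    rw [show ((k : Int) + 1) = ((k + 1 : Nat) : Int) by push_cast; ring]
    rw [ih (k + 1) hd]
    simp only [h1, hd, pvPairsOf]

-- A's pair-building double loop, as written in the port
theorem pv_build_A (temp : List Char) :
    (PySem.List.pyRange 0 ((temp.length : Int) - 1) 1).foldl (fun acc i =>
      (PySem.List.pyRange (i + 1) (temp.length : Int) 1).foldl (fun acc2 j =>
        acc2 ++ [[PySem.List.pyGetD temp i ' ', PySem.List.pyGetD temp j ' ']]) acc) []
    = (pvPairsOf temp).map (fun p => [p.1, p.2]) := by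
  simp only [PySem.List.foldl_append_singleton_eq_map, PySem.List.foldl_append_eq_flatMap]
  simp only [List.nil_append]
  have hcongr : ∀ i ∈ PySem.List.pyRange 0 ((temp.length : Int) - 1) 1,
      (PySem.List.pyRange (i + 1) (temp.length : Int) 1).map
          (fun j => [PySem.List.pyGetD temp i ' ', PySem.List.pyGetD temp j ' '])
        = (temp.drop (i.toNat + 1)).map (fun y => [PySem.List.pyGetD temp i ' ', y]) := by
    intro i hi
    have h0 : 0 ≤ i := ((PySem.List.mem_pyRange_one).mp hi).1
    have : (PySem.List.pyRange (i + 1) (temp.length : Int) 1).map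
          (fun j => [PySem.List.pyGetD temp i ' ', PySem.List.pyGetD temp j ' '])
        = ((PySem.List.pyRange (i + 1) (temp.length : Int) 1).map
            (fun j => PySem.List.pyGetD temp j ' ')).map
            (fun y => [PySem.List.pyGetD temp i ' ', y]) := by
      rw [List.map_map]; rfl
    rw [this, PySem.List.map_pyGetD_pyRange' temp ' ' (by omega)]
    have : (i + 1).toNat = i.toNat + 1 := by omega
    rw [this]
  calc (PySem.List.pyRange 0 ((temp.length : Int) - 1) 1).flatMap
          (fun i => (PySem.List.pyRange (i + 1) (temp.length : Int) 1).map
            (fun j => [PySem.List.pyGetD temp i ' ', PySem.List.pyGetD temp j ' ']))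
      = (PySem.List.pyRange 0 ((temp.length : Int) - 1) 1).flatMap
          (fun i => (temp.drop (i.toNat + 1)).map (fun y => [PySem.List.pyGetD temp i ' ', y])) := by
        simp only [List.flatMap_def]
        rw [List.map_congr_left hcongr]
    _ = (pvPairsOf temp).map (fun p => [p.1, p.2]) := by
        have := pv_pairsA temp temp 0 (by simp)
        simpa using this

-- B's pair-building double loop, as written in the port
theorem pv_build_B (chars : List Char) :
    (PySem.List.enumerate chars).foldl (fun acc ia =>
      (PySem.List.slice chars (some (ia.1 + 1)) none).foldl (fun acc2 b => acc2 ++ [(ia.2, b)]) acc) []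
    = pvPairsOf chars := by
  simp only [PySem.List.foldl_append_singleton_eq_map, PySem.List.foldl_append_eq_flatMap]
  simp only [List.nil_append]
  have hcongr : ∀ ia ∈ PySem.List.enumerate chars 0,
      (PySem.List.slice chars (some (ia.1 + 1)) none).map (fun b => (ia.2, b))
        = (chars.drop (ia.1.toNat + 1)).map (fun y => (ia.2, y)) := by
    intro ia hia
    obtain ⟨k, hk, rfl⟩ := (PySem.List.mem_enumerate_iff chars 0 ia).mp hia
    have h0 : (0 : Int) ≤ 0 + (k : Int) + 1 := by omega
    rw [PySem.List.slice_from chars h0]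
    have : ((0 : Int) + (k : Int) + 1).toNat = ((0 : Int) + (k : Int)).toNat + 1 := by omega
    rw [this]
  calc (PySem.List.enumerate chars 0).flatMap
          (fun ia => (PySem.List.slice chars (some (ia.1 + 1)) none).map (fun b => (ia.2, b)))
      = (PySem.List.enumerate chars 0).flatMap
          (fun ia => (chars.drop (ia.1.toNat + 1)).map (fun y => (ia.2, y))) := by
        simp only [List.flatMap_def]
        rw [List.map_congr_left hcongr]
    _ = pvPairsOf chars := by
        have := pv_pairsB chars chars 0 (by simp)
        simpa using this

-- ===== VERDICT (by name: the statement is the Claim_ definition above) =====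
theorem alternate_spec : Claim_equal_alternate := by
  intro s _
  show alternate s = alternate_alt s
  unfold alternate alternate_alt
  simp only [PySem.List.dedup_eq_ofList]
  rw [pv_build_A, pv_build_B]
  rw [pv_zip_fold (pvPairsOf (PySem.Set.ofList s.toList)) s.toList (fun _ => (none, 0, true))]
  rw [pv_loops_eq s.toList (pvPairsOf (PySem.Set.ofList s.toList)) 0 0 (by omega) (fun _ => rfl)]
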